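-- pv_equiv track=rewrite | github.com/Natsuoo21/neo | backend/neo/orchestrator.py | _truncate_history
-- ===== SOURCE A (Python) =====
-- def _estimate_tokens(text: str) -> int:
--     """Rough token estimate: ~4 chars per token."""
--     return len(text) // 4
--
-- def _truncate_history(
--     messages: list[dict],
--     max_tokens: int,
--     reserved_tokens: int,
-- ) -> list[dict]:
--     """Drop oldest messages to fit within budget.
--
--     Always keeps the last message (current user command).
--     """
--     if not messages:
--         return []
--
--     budget = max_tokens - reserved_tokens
--     if budget <= 0:
--         return messages[-1:]
--
--     # Always include the last message (current user command)
--     last = messages[-1]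
--     remaining = messages[:-1]
--
--     result: list[dict] = [last]
--     total = _estimate_tokens(last.get("content", ""))
--
--     # Add older messages from newest to oldest
--     for msg in reversed(remaining):
--         msg_tokens = _estimate_tokens(msg.get("content", ""))
--         if total + msg_tokens > budget:
--             break
--         result.append(msg)
--         total += msg_tokens
--
--     # result is [last, second-to-last, ...] — reverse the prefix
--     return list(reversed(result[1:])) + [result[0]]
-- ===== SOURCE B (Python) =====
-- def _truncate_history(messages, max_tokens, reserved_tokens):
--     if not messages:
--         return []
--     budget = max_tokens - reserved_tokens
--     if budget <= 0:
--         return messages[-1:]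
--     # Forward dropping: start from the grand total and drop oldest messages,
--     # subtracting their estimates, while the remaining suffix still exceeds the
--     # budget (never dropping the last message). Correct because estimates are
--     # nonnegative, so suffixes that fit the budget are closed under shortening.
--     total = sum(len(m.get("content", "")) // 4 for m in messages)
--     i = 0
--     while i < len(messages) - 1 and total > budget:
--         total -= len(messages[i].get("content", "")) // 4
--         i += 1
--     return messages[i:]
-- ===== Notes on version B (the rewrite author's own statement) =====
-- stated objective: alternative
-- what changed: B computes the grand token total once, then scans FORWARD from the oldest message, dropping messages and subtracting their estimates while the remaining suffix total still exceeds the budget (never dropping the last), and returns one trailing slice; A instead scans backward from the newest, accumulating estimates into an appended result list it finally reverses. Equivalent because the estimates are nonnegative, so fitting suffixes are closed under shortening.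
import Mathlib
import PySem

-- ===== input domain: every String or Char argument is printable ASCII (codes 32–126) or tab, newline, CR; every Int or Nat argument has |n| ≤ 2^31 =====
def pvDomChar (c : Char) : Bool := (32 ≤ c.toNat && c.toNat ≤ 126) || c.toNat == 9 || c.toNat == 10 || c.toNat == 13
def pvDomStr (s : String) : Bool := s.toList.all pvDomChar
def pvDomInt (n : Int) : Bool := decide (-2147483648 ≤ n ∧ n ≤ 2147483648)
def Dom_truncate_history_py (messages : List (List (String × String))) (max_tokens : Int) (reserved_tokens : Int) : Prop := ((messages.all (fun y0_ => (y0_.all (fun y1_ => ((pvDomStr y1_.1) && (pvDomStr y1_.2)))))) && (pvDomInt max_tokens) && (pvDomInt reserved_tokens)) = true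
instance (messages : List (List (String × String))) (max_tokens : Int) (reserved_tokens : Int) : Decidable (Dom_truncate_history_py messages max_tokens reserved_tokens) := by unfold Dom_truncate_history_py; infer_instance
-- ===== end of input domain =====

-- B replaces A's backward accumulate-append-reverse scan by a forward dropping scan
-- from a precomputed grand total (objective: alternative; equivalent since estimates are ≥ 0).

-- ===== PORT A =====
-- _estimate_tokens(text) = len(text) // 4
def estTok (s : String) : Int := PySem.Int.floordiv (PySem.Str.len s) 4

-- msg.get("content", "") : first-match lookup in the association list, default ""
def msgContent (m : List (String × String)) : String :=
  match m.find? (fun p => p.1 == "content") with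
  | some p => p.2
  | none => ""

-- A's for-loop with break: state (result, total), scanning reversed(remaining)
def truncA_loop (budget : Int) :
    List (List (String × String)) → List (List (String × String)) → Int → List (List (String × String))
  | [], result, _ => result
  | m :: rest, result, total =>
    let msg_tokens := estTok (msgContent m)
    if total + msg_tokens > budget then result
    else truncA_loop budget rest (result ++ [m]) (total + msg_tokens)

def truncate_history_py (messages : List (List (String × String))) (max_tokens : Int) (reserved_tokens : Int) : List (List (String × String)) :=
  if messages = [] then []
  else
    let budget := max_tokens - reserved_tokens
    if budget ≤ 0 then PySem.List.slice messages (some (-1)) none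
    else
      let last := messages.getLastD []          -- messages[-1]; exact: messages ≠ []
      let remaining := PySem.List.slice messages none (some (-1))   -- messages[:-1]
      let result := truncA_loop budget remaining.reverse [last] (estTok (msgContent last))
      -- list(reversed(result[1:])) + [result[0]]; result ≠ [], so [result[0]] = result.take 1
      (PySem.List.slice result (some 1) none).reverse ++ result.take 1

-- ===== PORT B =====
-- the while loop: drop from the front while more than one message remains and total > budget
def truncB_drop (budget : Int) : Int → List (List (String × String)) → List (List (String × String))
  | _, [] => []
  | _, [m] => [m]
  | total, m :: rest =>
    if budget < total then truncB_drop budget (total - estTok (msgContent m)) rest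
    else m :: rest

def truncate_history_py_alt (messages : List (List (String × String))) (max_tokens : Int) (reserved_tokens : Int) : List (List (String × String)) :=
  if messages = [] then []
  else
    let budget := max_tokens - reserved_tokens
    if budget ≤ 0 then messages.drop (messages.length - 1)   -- messages[-1:]
    else
      let total := (messages.map (fun m => estTok (msgContent m))).sum
      truncB_drop budget total messages

-- ===== PRECONDITION & SPEC =====
def Spec_truncate_history_py (messages : List (List (String × String))) (max_tokens : Int) (reserved_tokens : Int) (out : List (List (String × String))) : Prop := out = truncate_history_py_alt messages max_tokens reserved_tokens
instance (messages : List (List (String × String))) (max_tokens : Int) (reserved_tokens : Int) (out : List (List (String × String))) : Decidable (Spec_truncate_history_py messages max_tokens reserved_tokens out) := by unfold Spec_truncate_history_py; infer_instance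

-- ===== CLAIM (what is proved, stated in full; the proofs are below) =====
def Claim_equal_truncate_history_py : Prop := ∀ (messages : List (List (String × String))) (max_tokens : Int) (reserved_tokens : Int), Dom_truncate_history_py messages max_tokens reserved_tokens → Spec_truncate_history_py messages max_tokens reserved_tokens (truncate_history_py messages max_tokens reserved_tokens)

-- ===== LEMMAS AND PROOFS =====

def tok (m : List (String × String)) : Int := estTok (msgContent m)
def sumT (l : List (List (String × String))) : Int := (l.map tok).sum

theorem estTok_nonneg (s : String) : 0 ≤ estTok s := by
  unfold estTok
  have : (0:Int) ≤ PySem.Str.len s := by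
    simp [PySem.Str.len]
  simp [PySem.Int.floordiv]
  exact Int.fdiv_nonneg this (by norm_num)

theorem sumT_nonneg (l : List (List (String × String))) : 0 ≤ sumT l := by
  induction l with
  | nil => simp [sumT]
  | cons a l ih =>
    have h1 : 0 ≤ tok a := estTok_nonneg (msgContent a)
    have h2 : sumT (a :: l) = tok a + sumT l := by simp [sumT]
    omega

-- what A's loop keeps, as a structural takeWhile on cumulative totals
def takeCum (budget : Int) : List (List (String × String)) → Int → List (List (String × String))
  | [], _ => []
  | m :: rest, t =>
    if t + estTok (msgContent m) > budget then []
    else m :: takeCum budget rest (t + estTok (msgContent m))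

theorem truncA_loop_eq (budget : Int) :
    ∀ (l res : List (List (String × String))) (total : Int),
      truncA_loop budget l res total = res ++ takeCum budget l total := by
  intro l
  induction l with
  | nil => intro res total; simp [truncA_loop, takeCum]
  | cons m rest ih =>
    intro res total
    simp only [truncA_loop, takeCum]
    split_ifs with h
    · simp
    · rw [ih]; simp

-- takeCum takes everything when the whole sum fits (estimates are nonnegative)
theorem takeCum_full (budget : Int) :
    ∀ (l : List (List (String × String))) (t : Int), t + sumT l ≤ budget →
      takeCum budget l t = l := by
  intro l
  induction l with
  | nil => intro t _; rfl
  | cons m rest ih =>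
    intro t h
    have hw : sumT (m :: rest) = tok m + sumT rest := by simp [sumT]
    have h1 := sumT_nonneg rest
    simp only [takeCum]
    rw [if_neg (by unfold tok at hw; omega)]
    rw [ih (t + estTok (msgContent m)) (by unfold tok at hw; omega)]

-- appending one element that would overflow the total changes nothing
theorem takeCum_append_overflow (budget : Int) (a : List (String × String)) :
    ∀ (l : List (List (String × String))) (t : Int), budget < t + sumT l + tok a →
      takeCum budget (l ++ [a]) t = takeCum budget l t := by
  intro l
  induction l with
  | nil =>
    intro t h
    simp only [sumT, List.map_nil, List.sum_nil, add_zero] at h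
    simp only [List.nil_append, takeCum]
    rw [if_pos (by unfold tok at h; omega)]
  | cons m rest ih =>
    intro t h
    have hw : sumT (m :: rest) = tok m + sumT rest := by simp [sumT]
    simp only [List.cons_append, takeCum]
    split_ifs with hc
    · rfl
    · rw [ih (t + estTok (msgContent m)) (by unfold tok at hw; omega)]

-- the forward dropping loop, characterised against A's takeCum
theorem truncB_cons (budget total : Int) (a : List (String × String))
    (l : List (List (String × String))) (h : l ≠ []) :
    truncB_drop budget total (a :: l) =
      if budget < total then truncB_drop budget (total - estTok (msgContent a)) l
      else a :: l := by
  cases l with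
  | nil => exact absurd rfl h
  | cons b l' => simp [truncB_drop]

theorem bridge (budget : Int) :
    ∀ (ms : List (List (String × String))) (m : List (String × String)),
      truncB_drop budget (sumT (ms ++ [m])) (ms ++ [m]) =
        (takeCum budget ms.reverse (tok m)).reverse ++ [m] := by
  intro ms
  induction ms with
  | nil =>
    intro m
    simp [truncB_drop, takeCum]
  | cons a ms' ih =>
    intro m
    have hne : ms' ++ [m] ≠ [] := by simp
    rw [List.cons_append, truncB_cons budget _ a (ms' ++ [m]) hne]
    have hs : sumT (a :: (ms' ++ [m])) = tok a + sumT ms' + tok m := by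
      simp [sumT, add_comm, add_left_comm]
    have hrev : (a :: ms').reverse = ms'.reverse ++ [a] := by simp
    have hsr : sumT ms'.reverse = sumT ms' := by
      simp [sumT]
    split_ifs with h
    · -- total overflows budget: drop a; appended oldest element a overflows on A's side too
      have hsub : sumT (a :: (ms' ++ [m])) - estTok (msgContent a) = sumT (ms' ++ [m]) := by
        simp [sumT, tok]
      rw [hsub, ih m, hrev, takeCum_append_overflow budget a ms'.reverse (tok m) (by rw [hsr]; unfold tok at hs ⊢; omega)]
    · -- everything fits: both keep the whole list
      rw [hrev, takeCum_full budget (ms'.reverse ++ [a]) (tok m)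
            (by have : sumT (ms'.reverse ++ [a]) = sumT ms'.reverse + tok a := by simp [sumT]
                rw [this, hsr]; unfold tok at hs ⊢; omega)]
      simp

theorem truncate_history_py_spec_aux :
    ∀ (messages : List (List (String × String))) (max_tokens reserved_tokens : Int),
      truncate_history_py messages max_tokens reserved_tokens =
        truncate_history_py_alt messages max_tokens reserved_tokens := by
  intro messages max_tokens reserved_tokens
  rcases List.eq_nil_or_concat messages with hnil | ⟨ms, m, rfl⟩
  · subst hnil; rfl
  · have hne : ms ++ [m] ≠ [] := by simp
    unfold truncate_history_py truncate_history_py_alt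
    simp only [List.concat_eq_append]
    rw [if_neg hne, if_neg hne]
    split_ifs with hb
    · -- budget ≤ 0 : messages[-1:] both ways
      rw [PySem.List.slice_from_neg_one]
    · -- main branch
      rw [PySem.List.slice_to_neg_one]
      rw [truncA_loop_eq]
      set budget := max_tokens - reserved_tokens with hbdef
      have hlast : (ms ++ [m]).getLastD ([] : List (String × String)) = m := by simp
      have hdl : (ms ++ [m]).dropLast = ms := by simp
      rw [hlast, hdl]
      have hsum : ((ms ++ [m]).map (fun x => estTok (msgContent x))).sum = sumT (ms ++ [m]) := by
        rfl
      rw [hsum, bridge budget ms m]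
      -- A's result: ([m] ++ takeCum …) massaged through result[1:] / result[0]
      rw [PySem.List.slice_from_one]
      simp [tok]

-- ===== VERDICT (by name: the statement is the Claim_ definition above) =====
theorem truncate_history_py_spec : Claim_equal_truncate_history_py := by
  intro messages max_tokens reserved_tokens _
  unfold Spec_truncate_history_py
  exact truncate_history_py_spec_aux messages max_tokens reserved_tokens
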